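-- pv_equiv track=rewrite | github.com/IsakEliH/Exorcims | solutions/python/inventory-management/3/dicts.py | loop
-- ===== SOURCE A (Python) =====
-- def loop(inventory, items, flag: bool):
--     for item in items:
--         if flag is True:
--             if inventory.get(item) is None:
--                 inventory[item] = 1
--             else:
--                 inventory[item] += 1
--         elif flag is False:
--             if inventory.get(item) is not None:
--                 if inventory[item] > 0:
--                     inventory[item] -= 1
--
--     return inventory
-- ===== SOURCE B (Python) =====
-- def loop(inventory, items, flag: bool):
--     counts = {}
--     for item in items:
--         counts[item] = counts.get(item, 0) + 1
--     if flag is True: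
--         for item, c in counts.items():
--             inventory[item] = inventory.get(item, 0) + c
--     elif flag is False:
--         for item, c in counts.items():
--             v = inventory.get(item)
--             if v is not None and v > 0:
--                 inventory[item] = max(0, v - c)
--     return inventory
-- ===== Notes on version B (the rewrite author's own statement) =====
-- stated objective: alternative
-- what changed: A walks items once and updates the dict per occurrence; B first builds a frequency table of items in one pass and then applies a single closed-form update per distinct item (add the count, or clamp-subtract it behind the original value>0 guard).
import Mathlib
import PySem

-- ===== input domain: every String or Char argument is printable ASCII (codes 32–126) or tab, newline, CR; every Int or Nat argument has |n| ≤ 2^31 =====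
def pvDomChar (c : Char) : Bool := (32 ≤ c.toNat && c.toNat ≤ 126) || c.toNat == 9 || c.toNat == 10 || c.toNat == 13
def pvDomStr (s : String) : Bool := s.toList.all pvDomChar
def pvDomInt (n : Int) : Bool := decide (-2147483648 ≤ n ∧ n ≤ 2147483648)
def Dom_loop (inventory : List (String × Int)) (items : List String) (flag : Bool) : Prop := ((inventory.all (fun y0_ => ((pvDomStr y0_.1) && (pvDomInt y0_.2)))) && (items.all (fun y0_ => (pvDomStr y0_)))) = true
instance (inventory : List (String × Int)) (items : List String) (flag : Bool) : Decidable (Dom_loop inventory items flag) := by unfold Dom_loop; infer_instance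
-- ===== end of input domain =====

-- B replaces A's per-occurrence walk by two passes (frequency table, then one closed-form
-- update per distinct item); same return value and same in-place mutation of `inventory`.

-- ===== PORT A =====
-- one iteration of A's for-loop body (branches in A's order)
def loopStepA (flag : Bool) (inv : PySem.Dict String Int) (item : String) : PySem.Dict String Int :=
  if flag = true then
    match inv.get? item with
    | none => inv.insert item 1
    | some v => inv.insert item (v + 1)
  else
    match inv.get? item with
    | none => inv
    | some v => if v > 0 then inv.insert item (v - 1) else inv

def loop (inventory : List (String × Int)) (items : List String) (flag : Bool) : List (String × Int) :=
  (items.foldl (loopStepA flag) (PySem.Dict.mk inventory)).items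

-- ===== PORT B =====
-- counts[item] = counts.get(item, 0) + 1
def loopCountB (items : List String) : PySem.Dict String Int :=
  items.foldl (fun c it => c.insert it (c.getD it 0 + 1)) PySem.Dict.empty

-- inventory[item] = inventory.get(item, 0) + c
def loopIncB (inv : PySem.Dict String Int) (p : String × Int) : PySem.Dict String Int :=
  inv.insert p.1 (inv.getD p.1 0 + p.2)

-- v = inventory.get(item); if v is not None and v > 0: inventory[item] = max(0, v - c)
def loopDecB (inv : PySem.Dict String Int) (p : String × Int) : PySem.Dict String Int :=
  match inv.get? p.1 with
  | some v => if v > 0 then inv.insert p.1 (max 0 (v - p.2)) else inv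
  | none => inv

def loop_alt (inventory : List (String × Int)) (items : List String) (flag : Bool) : List (String × Int) :=
  let counts := loopCountB items
  (if flag = true then counts.items.foldl loopIncB (PySem.Dict.mk inventory)
   else counts.items.foldl loopDecB (PySem.Dict.mk inventory)).items

-- ===== PRECONDITION & SPEC =====
def Spec_loop (inventory : List (String × Int)) (items : List String) (flag : Bool) (out : List (String × Int)) : Prop := out = loop_alt inventory items flag
instance (inventory : List (String × Int)) (items : List String) (flag : Bool) (out : List (String × Int)) : Decidable (Spec_loop inventory items flag out) := by unfold Spec_loop; infer_instance

-- ===== CLAIM (what is proved, stated in full; the proofs are below) =====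
def Claim_equal_loop : Prop := ∀ (inventory : List (String × Int)) (items : List String) (flag : Bool), Dom_loop inventory items flag → Spec_loop inventory items flag (loop inventory items flag)

-- ===== LEMMAS AND PROOFS =====

-- A's flag=True body, as a single insert
theorem stepA_true_eq (inv : PySem.Dict String Int) (item : String) :
    loopStepA true inv item = inv.insert item (inv.getD item 0 + 1) := by
  unfold loopStepA
  cases h : inv.get? item with
  | none => rw [PySem.Dict.getD_of_get?_eq_none _ _ h]; simp
  | some v => rw [PySem.Dict.getD_of_get?_eq_some _ _ h]; simp

-- two inserts at distinct keys commute when the first key is already present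
theorem insert_comm_of_contains (d : PySem.Dict String Int) (k b : String) (v u : Int)
    (hne : b ≠ k) (hc : d.contains k = true) :
    (d.insert k v).insert b u = (d.insert b u).insert k v := by
  have hbk : (b == k) = false := by simp [hne]
  have hkb : (k == b) = false := by simp [Ne.symm hne]
  by_cases hb : d.contains b = true
  · apply PySem.Dict.ext
    rw [PySem.Dict.items_insert_of_contains _ _ (by rw [PySem.Dict.contains_insert, hbk, hb]; rfl),
        PySem.Dict.items_insert_of_contains _ _ hc,
        PySem.Dict.items_insert_of_contains _ _ (by rw [PySem.Dict.contains_insert, hkb, hc]; rfl),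
        PySem.Dict.items_insert_of_contains _ _ hb, List.map_map, List.map_map]
    apply List.map_congr_left
    intro p _
    by_cases hpk : p.1 = k <;> by_cases hpb : p.1 = b <;>
      simp [Function.comp, hpk, hpb, hkb]
    simp_all
  · apply PySem.Dict.ext
    rw [PySem.Dict.items_insert_of_not_contains _ _ (by rw [PySem.Dict.contains_insert, hbk]; simpa using hb),
        PySem.Dict.items_insert_of_contains _ _ hc,
        PySem.Dict.items_insert_of_contains _ _ (by rw [PySem.Dict.contains_insert, hkb, hc]; rfl),
        PySem.Dict.items_insert_of_not_contains _ _ (by simpa using hb), List.map_append]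
    simp
    exact fun h => absurd h hne

-- folding B's increment over pairs whose keys avoid k commutes with an insert at a present key k
theorem foldl_inc_insert_comm (l : List (String × Int)) (d : PySem.Dict String Int)
    (k : String) (v : Int) (hl : ∀ p ∈ l, p.1 ≠ k) (hc : d.contains k = true) :
    l.foldl loopIncB (d.insert k v) = (l.foldl loopIncB d).insert k v := by
  induction l generalizing d with
  | nil => rfl
  | cons p l ih =>
      have hpk : p.1 ≠ k := hl p List.mem_cons_self
      simp only [List.foldl_cons]
      have h1 : loopIncB (d.insert k v) p = (loopIncB d p).insert k v := by
        unfold loopIncB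
        rw [PySem.Dict.getD_insert_of_ne _ _ _ hpk, insert_comm_of_contains _ _ _ _ _ hpk hc]
      rw [h1, ih _ (fun q hq => hl q (List.mem_cons_of_mem _ hq))
            (by unfold loopIncB; rw [PySem.Dict.contains_insert]; simp [hc])]

theorem foldl_dec_insert_comm (l : List (String × Int)) (d : PySem.Dict String Int)
    (k : String) (v : Int) (hl : ∀ p ∈ l, p.1 ≠ k) (hc : d.contains k = true) :
    l.foldl loopDecB (d.insert k v) = (l.foldl loopDecB d).insert k v := by
  induction l generalizing d with
  | nil => rfl
  | cons p l ih =>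
      have hpk : p.1 ≠ k := hl p List.mem_cons_self
      have htl : ∀ q ∈ l, q.1 ≠ k := fun q hq => hl q (List.mem_cons_of_mem _ hq)
      simp only [List.foldl_cons]
      have h1 : loopDecB (d.insert k v) p = (loopDecB d p).insert k v ∧
          (loopDecB d p).contains k = true := by
        unfold loopDecB
        rw [PySem.Dict.get?_insert_of_ne _ _ hpk]
        cases h : d.get? p.1 with
        | none => exact ⟨by rfl, hc⟩
        | some w =>
            by_cases hw : w > 0
            · simp only [if_pos hw]
              exact ⟨insert_comm_of_contains _ _ _ _ _ hpk hc,
                by rw [PySem.Dict.contains_insert]; simp [hc]⟩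
            · simp only [if_neg hw]; exact ⟨trivial, hc⟩
      rw [h1.1, ih _ htl h1.2]

theorem foldl_inc_get?_of_ne (l : List (String × Int)) (d : PySem.Dict String Int)
    (k : String) (hl : ∀ p ∈ l, p.1 ≠ k) :
    (l.foldl loopIncB d).get? k = d.get? k := by
  induction l generalizing d with
  | nil => rfl
  | cons p l ih =>
      have hpk : p.1 ≠ k := hl p List.mem_cons_self
      simp only [List.foldl_cons]
      rw [ih _ (fun q hq => hl q (List.mem_cons_of_mem _ hq))]
      unfold loopIncB
      rw [PySem.Dict.get?_insert_of_ne _ _ (Ne.symm hpk)]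

theorem foldl_dec_get?_of_ne (l : List (String × Int)) (d : PySem.Dict String Int)
    (k : String) (hl : ∀ p ∈ l, p.1 ≠ k) :
    (l.foldl loopDecB d).get? k = d.get? k := by
  induction l generalizing d with
  | nil => rfl
  | cons p l ih =>
      have hpk : p.1 ≠ k := hl p List.mem_cons_self
      simp only [List.foldl_cons]
      rw [ih _ (fun q hq => hl q (List.mem_cons_of_mem _ hq))]
      unfold loopDecB
      cases h : d.get? p.1 with
      | none => rfl
      | some w =>
          by_cases hw : w > 0
          · simp only [if_pos hw]; rw [PySem.Dict.get?_insert_of_ne _ _ (Ne.symm hpk)]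
          · simp only [if_neg hw]

-- a contained key splits the items list, with the key nowhere else (keys are nodup)
theorem split_of_contains (c : PySem.Dict String Int) (it : String)
    (hnd : c.keys.Nodup) (hc : c.contains it = true) :
    ∃ l1 m l2, c.items = l1 ++ (it, m) :: l2 ∧ (∀ q ∈ l1, q.1 ≠ it) ∧
      (∀ q ∈ l2, q.1 ≠ it) ∧ c.getD it 0 = m := by
  have hk : it ∈ c.keys := (PySem.Dict.contains_iff_mem_keys _ _).mp hc
  simp only [PySem.Dict.keys] at hk hnd
  obtain ⟨p, hp, hp1⟩ := List.mem_map.mp hk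
  obtain ⟨l1, l2, hs⟩ := List.append_of_mem hp
  have hpe : p = (it, p.2) := by
    obtain ⟨a, b⟩ := p
    have ha : a = it := hp1
    rw [ha]
  refine ⟨l1, p.2, l2, by rw [hs, ← hpe], ?_, ?_, ?_⟩
  · intro q hq hq1
    rw [hs, List.map_append] at hnd
    exact (List.disjoint_of_nodup_append hnd) (List.mem_map.mpr ⟨q, hq, hq1⟩)
      (List.mem_map.mpr ⟨p, List.mem_cons_self, hp1⟩)
  · intro q hq hq1
    rw [hs, List.map_append] at hnd
    have hc2 := (List.nodup_append.mp hnd).2.1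
    rw [List.map_cons] at hc2
    have hpit : p.1 = it := hp1
    rw [hpit] at hc2
    exact (List.nodup_cons.mp hc2).1 (List.mem_map.mpr ⟨q, hq, hq1⟩)
  · exact PySem.Dict.getD_of_mem_items _ (by rw [← hpe]; exact hp)
      (by simpa only [PySem.Dict.keys] using hnd) _

-- inserting at a contained key rewrites exactly the one entry of the split
theorem items_insert_split (c : PySem.Dict String Int) (it : String) (w m : Int)
    (l1 l2 : List (String × Int)) (hc : c.contains it = true)
    (hs : c.items = l1 ++ (it, m) :: l2) (h1 : ∀ q ∈ l1, q.1 ≠ it) (h2 : ∀ q ∈ l2, q.1 ≠ it) :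
    (c.insert it w).items = l1 ++ (it, w) :: l2 := by
  have e1 : List.map (fun p => if (p.1 == it) = true then (it, w) else p) l1 = l1 := by
    rw [List.map_congr_left (g := id) (fun q hq => by simp [h1 q hq]), List.map_id]
  have e2 : List.map (fun p => if (p.1 == it) = true then (it, w) else p) l2 = l2 := by
    rw [List.map_congr_left (g := id) (fun q hq => by simp [h2 q hq]), List.map_id]
  rw [PySem.Dict.items_insert_of_contains _ _ hc, hs, List.map_append, List.map_cons, e1, e2]
  simp

-- key step, increment side
theorem key_inc (c : PySem.Dict String Int) (inv : PySem.Dict String Int) (it : String)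
    (hnd : c.keys.Nodup) :
    (c.insert it (c.getD it 0 + 1)).items.foldl loopIncB inv
      = loopStepA true (c.items.foldl loopIncB inv) it := by
  rw [stepA_true_eq]
  cases hc : c.contains it with
  | false =>
      rw [PySem.Dict.getD_of_not_contains _ _ hc,
          PySem.Dict.items_insert_of_not_contains _ _ hc, List.foldl_append]
      simp only [List.foldl_cons, List.foldl_nil]
      unfold loopIncB
      norm_num
  | true =>
      obtain ⟨l1, m, l2, hs, h1, h2, hm⟩ := split_of_contains c it hnd hc
      rw [hm, items_insert_split c it (m + 1) m l1 l2 hc hs h1 h2, hs,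
          List.foldl_append, List.foldl_append]
      simp only [List.foldl_cons]
      set d1 := l1.foldl loopIncB inv with hd1
      rw [show loopIncB d1 (it, m + 1) = d1.insert it (d1.getD it 0 + (m + 1)) from rfl,
          show loopIncB d1 (it, m) = d1.insert it (d1.getD it 0 + m) from rfl]
      have hg : (l2.foldl loopIncB (d1.insert it (d1.getD it 0 + m))).getD it 0
          = d1.getD it 0 + m := by
        rw [PySem.Dict.getD_eq_get?_getD, foldl_inc_get?_of_ne l2 _ it h2,
            PySem.Dict.get?_insert_self]
        rfl
      rw [hg, show d1.insert it (d1.getD it 0 + (m + 1))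
            = (d1.insert it (d1.getD it 0 + m)).insert it (d1.getD it 0 + m + 1) by
          rw [PySem.Dict.insert_insert_self, add_assoc],
        foldl_inc_insert_comm l2 _ it _ h2 (PySem.Dict.contains_insert_self _ _ _)]

theorem key_dec (c : PySem.Dict String Int) (inv : PySem.Dict String Int) (it : String)
    (hnd : c.keys.Nodup) :
    (c.insert it (c.getD it 0 + 1)).items.foldl loopDecB inv
      = loopStepA false (c.items.foldl loopDecB inv) it := by
  cases hc : c.contains it with
  | false =>
      rw [PySem.Dict.getD_of_not_contains _ _ hc,
          PySem.Dict.items_insert_of_not_contains _ _ hc, List.foldl_append]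
      simp only [List.foldl_cons, List.foldl_nil]
      set d := c.items.foldl loopDecB inv with hd
      have hdec : loopDecB d (it, (0:Int) + 1) = (match d.get? it with
          | some v => if v > 0 then d.insert it (max 0 (v - ((0:Int) + 1))) else d
          | none => d) := rfl
      rw [hdec]
      unfold loopStepA
      simp only [Bool.false_eq_true, if_false]
      cases h : d.get? it with
      | none => rfl
      | some v =>
          by_cases hv : v > 0
          · simp only [if_pos hv]
            congr 1
            omega
          · simp only [if_neg hv]
  | true =>
      obtain ⟨l1, m, l2, hs, h1, h2, hm⟩ := split_of_contains c it hnd hc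
      rw [hm, items_insert_split c it (m + 1) m l1 l2 hc hs h1 h2, hs,
          List.foldl_append, List.foldl_append]
      simp only [List.foldl_cons]
      set d1 := l1.foldl loopDecB inv with hd1
      unfold loopStepA
      simp only [Bool.false_eq_true, if_false]
      have hdec : ∀ w : Int, loopDecB d1 (it, w) = (match d1.get? it with
          | some v => if v > 0 then d1.insert it (max 0 (v - w)) else d1
          | none => d1) := fun w => rfl
      rw [hdec, hdec]
      cases hv : d1.get? it with
      | none =>
          rw [foldl_dec_get?_of_ne l2 d1 it h2, hv]
      | some v =>
          by_cases hv0 : v > 0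
          · simp only [if_pos hv0]
            rw [foldl_dec_get?_of_ne l2 _ it h2, PySem.Dict.get?_insert_self]
            by_cases hm0 : v - m > 0
            · simp only [if_pos (show max 0 (v - m) > 0 by omega)]
              rw [show d1.insert it (max 0 (v - (m + 1)))
                    = (d1.insert it (max 0 (v - m))).insert it (max 0 (v - m) - 1) by
                  rw [PySem.Dict.insert_insert_self]; congr 1; omega,
                foldl_dec_insert_comm l2 _ it _ h2 (PySem.Dict.contains_insert_self _ _ _)]
            · simp only [if_neg (show ¬ max 0 (v - m) > 0 by omega)]
              congr 2
              omega
          · simp only [if_neg hv0]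
            rw [foldl_dec_get?_of_ne l2 d1 it h2, hv]
            simp only [if_neg hv0]

theorem gen_inc (items : List String) (c : PySem.Dict String Int) (inv : PySem.Dict String Int)
    (hnd : c.keys.Nodup) :
    (items.foldl (fun c it => c.insert it (c.getD it 0 + 1)) c).items.foldl loopIncB inv
      = items.foldl (loopStepA true) (c.items.foldl loopIncB inv) := by
  induction items generalizing c inv with
  | nil => rfl
  | cons it rest ih =>
      simp only [List.foldl_cons]
      rw [ih _ _ (PySem.Dict.nodup_keys_insert _ _ _ hnd), key_inc c inv it hnd]

theorem gen_dec (items : List String) (c : PySem.Dict String Int) (inv : PySem.Dict String Int)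
    (hnd : c.keys.Nodup) :
    (items.foldl (fun c it => c.insert it (c.getD it 0 + 1)) c).items.foldl loopDecB inv
      = items.foldl (loopStepA false) (c.items.foldl loopDecB inv) := by
  induction items generalizing c inv with
  | nil => rfl
  | cons it rest ih =>
      simp only [List.foldl_cons]
      rw [ih _ _ (PySem.Dict.nodup_keys_insert _ _ _ hnd), key_dec c inv it hnd]

-- ===== VERDICT (by name: the statement is the Claim_ definition above) =====
theorem loop_spec : Claim_equal_loop := by
  intro inventory items flag _
  unfold Spec_loop loop loop_alt loopCountB
  cases flag with
  | true =>
      simp only [if_true]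
      rw [gen_inc items PySem.Dict.empty (PySem.Dict.mk inventory) PySem.Dict.nodup_keys_empty]
      rfl
  | false =>
      simp only [if_neg (by decide : ¬ (false = true))]
      rw [gen_dec items PySem.Dict.empty (PySem.Dict.mk inventory) PySem.Dict.nodup_keys_empty]
      rfl
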